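-- pv_equiv track=rewrite | github.com/tomcontileslie/ThatChord | rank.py | rank_bass
-- ===== SOURCE A (Python) =====
-- def rank_bass(frets, chord, tuning, order, stringstarts):
--     """
--     Penalises chords where the note played on the lowest string is not the bass
--     """
--     n         = len(frets)
--
--     # ordernew changes order to remove muted strings
--     bignum = max(order) + 1
--     ordernew = []
--     for i in range(n):
--         if frets[i] < stringstarts[i]:
--             ordernew.append(bignum)
--         else:
--             ordernew.append(order[i])
--
--     # lowest played string has min value in ordernew.
--     loword = min(ordernew)
--     lowstr = ordernew.index(loword)
--
--     # find note played on this string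
--     lownot = (frets[lowstr] + tuning[lowstr]) % 12
--
--     # return 0 iff note is the lowest note in chord.
--     if lownot == chord[0]:
--         return 0
--     else:
--         return 1
-- ===== SOURCE B (Python) =====
-- def rank_bass(frets, chord, tuning, order, stringstarts):
--     """
--     Penalises chords where the note played on the lowest string is not the bass.
--     Single pass computing the argmin over played strings directly (no bignum list).
--     """
--     best_i = None
--     best_v = None
--     for i in range(len(frets)):
--         if frets[i] >= stringstarts[i]:
--             v = order[i]
--             if best_i is None or v < best_v:
--                 best_i, best_v = i, v
--     idx = 0 if best_i is None else best_i
--     lownot = (frets[idx] + tuning[idx]) % 12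
--     return 0 if lownot == chord[0] else 1
-- ===== Notes on version B (the rewrite author's own statement) =====
-- stated objective: simpler
-- what changed: Replaces A's build-a-penalised-copy-then-min-then-index pipeline (max, list build, min, .index = four passes) by one direct argmin pass over the played strings with strict-< tie-breaking and a default index 0 when all strings are muted.
-- outside the precondition, e.g. on rank_bass([0, 0], [7], [7, 0], [3], [0, 5]): A returns 0, B returns 0
import Mathlib
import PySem

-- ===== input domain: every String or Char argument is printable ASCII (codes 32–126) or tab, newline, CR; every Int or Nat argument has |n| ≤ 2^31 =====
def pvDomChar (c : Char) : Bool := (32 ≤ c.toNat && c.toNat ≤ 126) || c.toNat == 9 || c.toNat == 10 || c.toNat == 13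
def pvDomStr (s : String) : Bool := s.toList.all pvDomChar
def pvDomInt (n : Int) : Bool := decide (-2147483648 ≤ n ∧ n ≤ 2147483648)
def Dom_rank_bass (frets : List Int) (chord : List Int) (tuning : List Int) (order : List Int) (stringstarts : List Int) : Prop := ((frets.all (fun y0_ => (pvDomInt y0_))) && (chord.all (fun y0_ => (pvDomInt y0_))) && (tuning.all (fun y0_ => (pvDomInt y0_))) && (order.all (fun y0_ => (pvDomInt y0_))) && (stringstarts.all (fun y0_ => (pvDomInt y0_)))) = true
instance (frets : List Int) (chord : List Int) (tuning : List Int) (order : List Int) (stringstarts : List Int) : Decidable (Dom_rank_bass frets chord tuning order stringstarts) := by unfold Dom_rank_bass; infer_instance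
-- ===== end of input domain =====

-- B replaces A's four-pass build-penalised-list / min / .index pipeline by one direct argmin pass (simpler, O(1) extra space).

-- ===== PORT A =====
def rank_bass (frets : List Int) (chord : List Int) (tuning : List Int) (order : List Int) (stringstarts : List Int) : Int :=
  let n := frets.length
  let bignum := (PySem.List.max? order (fun y => y)).getD 0 + 1   -- Pre_ gives order ≠ []; Python raises ValueError on [].
  let ordernew := (List.range n).foldl (fun (acc : List Int) (i : Nat) =>
    if PySem.List.pyGetD frets (i : Int) 0 < PySem.List.pyGetD stringstarts (i : Int) 0 then
      acc ++ [bignum]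
    else
      acc ++ [PySem.List.pyGetD order (i : Int) 0]) []
  let loword := (PySem.List.min? ordernew (fun y => y)).getD 0    -- Pre_ gives n ≥ 1, so ordernew ≠ [].
  let lowstr : Nat := (PySem.List.index? ordernew loword).getD 0
  let lownot := PySem.Int.mod (PySem.List.pyGetD frets (lowstr : Int) 0 + PySem.List.pyGetD tuning (lowstr : Int) 0) 12
  if lownot = PySem.List.pyGetD chord 0 0 then 0 else 1

-- ===== PORT B =====
-- loop body of B's single argmin pass (the if/update inside Source B's for-loop)
def rank_bass_step (frets : List Int) (stringstarts : List Int) (order : List Int)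
    (b : Option (Nat × Int)) (i : Nat) : Option (Nat × Int) :=
  if PySem.List.pyGetD stringstarts (i : Int) 0 ≤ PySem.List.pyGetD frets (i : Int) 0 then
    match b with
    | none => some (i, PySem.List.pyGetD order (i : Int) 0)
    | some (j, v) =>
        if PySem.List.pyGetD order (i : Int) 0 < v then some (i, PySem.List.pyGetD order (i : Int) 0)
        else some (j, v)
  else b

def rank_bass_alt (frets : List Int) (chord : List Int) (tuning : List Int) (order : List Int) (stringstarts : List Int) : Int :=
  let best := (List.range frets.length).foldl (rank_bass_step frets stringstarts order) none
  let idx : Nat := (best.map Prod.fst).getD 0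
  let lownot := PySem.Int.mod (PySem.List.pyGetD frets (idx : Int) 0 + PySem.List.pyGetD tuning (idx : Int) 0) 12
  if lownot = PySem.List.pyGetD chord 0 0 then 0 else 1

-- ===== PRECONDITION & SPEC =====
-- Pre_ requires order, stringstarts and tuning to have at least one entry per string and chord to be
-- nonempty; it additionally excludes inputs where order/tuning are shorter than frets but A still
-- returns because the missing entries happen never to be indexed (muted strings, bass below the gap) —
-- see claim.json "cites".
def Pre_rank_bass (frets : List Int) (chord : List Int) (tuning : List Int) (order : List Int) (stringstarts : List Int) : Prop :=
  frets ≠ [] ∧ chord ≠ [] ∧ frets.length ≤ order.length ∧ frets.length ≤ stringstarts.length ∧ frets.length ≤ tuning.length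
instance (frets : List Int) (chord : List Int) (tuning : List Int) (order : List Int) (stringstarts : List Int) : Decidable (Pre_rank_bass frets chord tuning order stringstarts) := by unfold Pre_rank_bass; infer_instance
def pvWitness_rank_bass : List Int × List Int × List Int × List Int × List Int := ([0], [0], [0], [0], [0])
def Spec_rank_bass (frets : List Int) (chord : List Int) (tuning : List Int) (order : List Int) (stringstarts : List Int) (out : Int) : Prop := out = rank_bass_alt frets chord tuning order stringstarts
instance (frets : List Int) (chord : List Int) (tuning : List Int) (order : List Int) (stringstarts : List Int) (out : Int) : Decidable (Spec_rank_bass frets chord tuning order stringstarts out) := by unfold Spec_rank_bass; infer_instance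

-- ===== CLAIM (what is proved, stated in full; the proofs are below) =====
def Claim_equal_rank_bass : Prop := ∀ (frets : List Int) (chord : List Int) (tuning : List Int) (order : List Int) (stringstarts : List Int), Dom_rank_bass frets chord tuning order stringstarts → Pre_rank_bass frets chord tuning order stringstarts → Spec_rank_bass frets chord tuning order stringstarts (rank_bass frets chord tuning order stringstarts)

-- ===== LEMMAS AND PROOFS =====

-- A's ordernew-building fold is map over range n.
theorem pv_afold_eq_map (g : Nat → Int) (n : Nat) :
    (List.range n).foldl (fun acc i => acc ++ [g i]) [] = (List.range n).map g := by
  induction n with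
  | zero => rfl
  | succ m ih => simp [List.range_succ, ih]

-- Specification of B's argmin fold.
theorem pv_bfold (frets stringstarts order : List Int) (n : Nat) :
    ((List.range n).foldl (rank_bass_step frets stringstarts order) none = none ∧
      ∀ i < n, PySem.List.pyGetD frets (i : Int) 0 < PySem.List.pyGetD stringstarts (i : Int) 0) ∨
    (∃ j v, (List.range n).foldl (rank_bass_step frets stringstarts order) none = some (j, v) ∧
      j < n ∧ PySem.List.pyGetD stringstarts (j : Int) 0 ≤ PySem.List.pyGetD frets (j : Int) 0 ∧
      v = PySem.List.pyGetD order (j : Int) 0 ∧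
      (∀ i < n, ¬ PySem.List.pyGetD frets (i : Int) 0 < PySem.List.pyGetD stringstarts (i : Int) 0 →
        v ≤ PySem.List.pyGetD order (i : Int) 0) ∧
      (∀ i < j, ¬ PySem.List.pyGetD frets (i : Int) 0 < PySem.List.pyGetD stringstarts (i : Int) 0 →
        v < PySem.List.pyGetD order (i : Int) 0)) := by
  induction n with
  | zero => exact Or.inl ⟨rfl, by omega⟩
  | succ m ih =>
    rw [List.range_succ, List.foldl_append]
    rcases ih with ⟨hnone, hall⟩ | ⟨j, v, heq, hj, hpl, hv, hmin, hfirst⟩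
    · rw [hnone]
      by_cases hm : PySem.List.pyGetD stringstarts (m : Int) 0 ≤ PySem.List.pyGetD frets (m : Int) 0
      · refine Or.inr ⟨m, _, ?_, by omega, hm, rfl, ?_, ?_⟩
        · simp only [List.foldl_cons, List.foldl_nil]
          unfold rank_bass_step
          rw [if_pos hm]
        · intro i hi hpi
          rcases Nat.lt_succ_iff_lt_or_eq.mp hi with h | h
          · exact absurd (hall i h) hpi
          · subst h; exact le_refl _
        · intro i hi hpi; exact absurd (hall i hi) hpi
      · refine Or.inl ⟨by simp only [List.foldl_cons, List.foldl_nil]; unfold rank_bass_step; rw [if_neg hm], ?_⟩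
        intro i hi
        rcases Nat.lt_succ_iff_lt_or_eq.mp hi with h | h
        · exact hall i h
        · subst h; omega
    · rw [heq]
      by_cases hm : PySem.List.pyGetD stringstarts (m : Int) 0 ≤ PySem.List.pyGetD frets (m : Int) 0
      · by_cases hlt : PySem.List.pyGetD order (m : Int) 0 < v
        · refine Or.inr ⟨m, _, by simp only [List.foldl_cons, List.foldl_nil]; unfold rank_bass_step; rw [if_pos hm]; exact if_pos hlt, by omega, hm, rfl, ?_, ?_⟩
          · intro i hi hpi
            rcases Nat.lt_succ_iff_lt_or_eq.mp hi with h | h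
            · exact le_of_lt (lt_of_lt_of_le hlt (hmin i h hpi))
            · subst h; exact le_refl _
          · intro i hi hpi
            exact lt_of_lt_of_le hlt (hmin i hi hpi)
        · refine Or.inr ⟨j, v, by simp only [List.foldl_cons, List.foldl_nil]; unfold rank_bass_step; rw [if_pos hm]; exact if_neg hlt, by omega, hpl, hv, ?_, hfirst⟩
          intro i hi hpi
          rcases Nat.lt_succ_iff_lt_or_eq.mp hi with h | h
          · exact hmin i h hpi
          · subst h; omega
      · refine Or.inr ⟨j, v, by simp only [List.foldl_cons, List.foldl_nil]; unfold rank_bass_step; rw [if_neg hm], by omega, hpl, hv, ?_, hfirst⟩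
        intro i hi hpi
        rcases Nat.lt_succ_iff_lt_or_eq.mp hi with h | h
        · exact hmin i h hpi
        · subst h; omega

-- min? with identity key returns v when v is a member and a lower bound.
theorem pv_min?_eq (xs : List Int) (v : Int) (hv : v ∈ xs) (hle : ∀ y ∈ xs, v ≤ y) :
    PySem.List.min? xs (fun y => y) = some v := by
  cases hmem : PySem.List.min? xs (fun y => y) with
  | none =>
    rw [PySem.List.min?_eq_none_iff] at hmem
    subst hmem; cases hv
  | some m =>
    have hm := PySem.List.min?_mem hmem
    have h1 := PySem.List.min?_isMin hmem v hv
    have h2 := hle m hm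
    simp at h1
    exact congrArg some (le_antisymm h1 h2)

-- .index(g j) over a mapped range is j when no earlier index has the same value.
theorem pv_index?_map_range (g : Nat → Int) (n j : Nat) (hj : j < n) (hne : ∀ i < j, g i ≠ g j) :
    PySem.List.index? ((List.range n).map g) (g j) = some j := by
  rw [PySem.List.index?_eq_some_iff]
  refine ⟨(List.range j).map g, (List.range (n - j - 1)).map (fun k => g (j + 1 + k)), ?_, by simp, ?_⟩
  · have h1 : List.range n = List.range (j + 1) ++ (List.range (n - j - 1)).map (fun k => (j + 1) + k) := by
      conv_lhs => rw [show n = (j + 1) + (n - j - 1) by omega]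
      exact List.range_add
    rw [h1, List.range_succ]
    simp [Function.comp]
  · simp only [List.mem_map, List.mem_range, not_exists]
    rintro i ⟨hi, hgi⟩
    exact hne i hi hgi

theorem rank_bass_main (frets chord tuning order stringstarts : List Int)
    (h : Pre_rank_bass frets chord tuning order stringstarts) :
    rank_bass frets chord tuning order stringstarts = rank_bass_alt frets chord tuning order stringstarts := by
  obtain ⟨hf, hc, hord, hss, htun⟩ := h
  have hn : 0 < frets.length := List.length_pos_iff.mpr hf
  have horder : order ≠ [] := by
    intro h0; rw [h0] at hord; simp at hord; exact hf hord
  obtain ⟨M, hM⟩ : ∃ M, PySem.List.max? order (fun y => y) = some M := by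
    cases hx : PySem.List.max? order (fun y => y) with
    | none => rw [PySem.List.max?_eq_none_iff] at hx; exact absurd hx horder
    | some M => exact ⟨M, rfl⟩
  have hbig : ∀ i < frets.length,
      PySem.List.pyGetD order (i : Int) 0 < (PySem.List.max? order (fun y => y)).getD 0 + 1 := by
    intro i hi
    rw [hM]
    have hi' : i < order.length := lt_of_lt_of_le hi hord
    have hmem : PySem.List.pyGetD order (i : Int) 0 ∈ order := by
      simp only [PySem.List.pyGetD_natCast]
      rw [List.getD_eq_getElem _ _ hi']
      exact List.getElem_mem _
    have := PySem.List.max?_isMax hM _ hmem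
    simp at this
    simp
    omega
  unfold rank_bass rank_bass_alt
  dsimp only
  -- turn A's list-building fold into a map
  have hfun : (fun (acc : List Int) (i : Nat) =>
      if PySem.List.pyGetD frets (i : Int) 0 < PySem.List.pyGetD stringstarts (i : Int) 0 then
        acc ++ [(PySem.List.max? order (fun y => y)).getD 0 + 1]
      else acc ++ [PySem.List.pyGetD order (i : Int) 0]) =
      (fun (acc : List Int) (i : Nat) => acc ++ [if PySem.List.pyGetD frets (i : Int) 0 < PySem.List.pyGetD stringstarts (i : Int) 0 then
        (PySem.List.max? order (fun y => y)).getD 0 + 1 else PySem.List.pyGetD order (i : Int) 0]) := by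
    funext acc i; split_ifs <;> rfl
  rw [hfun, pv_afold_eq_map]
  set g : Nat → Int := fun i =>
    if PySem.List.pyGetD frets (i : Int) 0 < PySem.List.pyGetD stringstarts (i : Int) 0 then
      (PySem.List.max? order (fun y => y)).getD 0 + 1
    else PySem.List.pyGetD order (i : Int) 0 with hg
  rcases pv_bfold frets stringstarts order frets.length with ⟨hnone, hall⟩ | ⟨j, v, heq, hj, hpl, hv, hmin, hfirst⟩
  · -- all strings muted: A takes index 0, B defaults to 0
    rw [hnone]
    have hg0 : ∀ i < frets.length, g i = g 0 := by
      intro i hi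
      simp only [hg]
      rw [if_pos (hall i hi), if_pos (hall 0 hn)]
    have hminv : PySem.List.min? ((List.range frets.length).map g) (fun y => y) = some (g 0) := by
      apply pv_min?_eq
      · exact List.mem_map.mpr ⟨0, List.mem_range.mpr hn, rfl⟩
      · rintro y hy
        obtain ⟨i, hi, rfl⟩ := List.mem_map.mp hy
        rw [hg0 i (List.mem_range.mp hi)]
    have hidx : PySem.List.index? ((List.range frets.length).map g) (g 0) = some 0 :=
      pv_index?_map_range g frets.length 0 hn (by omega)
    simp only [hminv, Option.getD_some]
    simp only [hidx, Option.getD_some]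
    simp
  · -- some string played: both sides land on the first argmin index j
    rw [heq]
    have hgj : g j = v := by
      simp only [hg]
      rw [if_neg (not_lt.mpr hpl)]
      exact hv.symm
    have hminv : PySem.List.min? ((List.range frets.length).map g) (fun y => y) = some v := by
      apply pv_min?_eq
      · exact List.mem_map.mpr ⟨j, List.mem_range.mpr hj, hgj⟩
      · rintro y hy
        obtain ⟨i, hi, rfl⟩ := List.mem_map.mp hy
        have hi' := List.mem_range.mp hi
        simp only [hg]
        split_ifs with hmut
        · have := hbig j hj
          rw [hv]; omega
        · exact hmin i hi' hmut
    rw [hminv]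
    have hne : ∀ i < j, g i ≠ g j := by
      intro i hi
      rw [hgj]
      simp only [hg]
      split_ifs with hmut
      · have := hbig j hj
        rw [hv]; omega
      · have := hfirst i hi hmut
        omega
    have hidx := pv_index?_map_range g frets.length j hj hne
    rw [hgj] at hidx
    simp only [Option.getD_some]
    simp only [hidx, Option.getD_some]
    simp

-- ===== VERDICT (by name: the statement is the Claim_ definition above) =====
theorem rank_bass_spec : Claim_equal_rank_bass := by
  intro frets chord tuning order stringstarts _ hpre
  unfold Spec_rank_bass
  exact rank_bass_main frets chord tuning order stringstarts hpre
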